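-- pv_equiv track=rewrite | github.com/lowxrider1/shh_task2 | report_vacancies.py | report_vacancies
-- ===== SOURCE A (Python) =====
-- def report_vacancies(numbers, periods):
--     #максимальное количество интервалов с максимальным количеством вакансий в период времени
--     max_intervals = 0
--     #суммарное время, в который было открыто максимальное количество вакансий
--     max_time = 0
--     #счетчик вакансий
--     count = 0
--     #счетчик вакансий на промежутке
--     max_vac = 0
--     start = 0
--     for p in periods:
--         if p[1] < 0:
--             count = count + 1
--             if count > max_vac:
--                 max_vac = count
--                 max_intervals = 1
--                 start = p[0]
--                 max_time = 0
--             elif count == max_vac: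
--                 max_intervals = max_intervals + 1
--                 start = p[0]
--         else:
--             if count == max_vac:
--                 max_time = max_time + p[0] - start + 1
--             count = count - 1
--     return max_intervals, max_time
-- ===== SOURCE B (Python) =====
-- def report_vacancies(numbers, periods):
--     # pass 1: peak level M = max(0, highest running count reached at open events)
--     count = 0
--     m = 0
--     for p in periods:
--         if p[1] < 0:
--             count += 1
--             if count > m:
--                 m = count
--         else:
--             count -= 1
--     # pass 2: count intervals and total time at level M only
--     count = 0
--     start = 0
--     max_intervals = 0
--     max_time = 0
--     for p in periods:
--         if p[1] < 0:
--             count += 1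
--             if count == m:
--                 max_intervals += 1
--                 start = p[0]
--         else:
--             if count == m:
--                 max_time += p[0] - start + 1
--             count -= 1
--     return max_intervals, max_time
-- ===== Notes on version B (the rewrite author's own statement) =====
-- stated objective: alternative
-- what changed: Replaces A's single sweep with reset-on-new-maximum bookkeeping by two sweeps: the first computes the peak open-vacancy level M = max(0, running count), the second counts intervals and accumulates time only at level M.
import Mathlib
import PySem

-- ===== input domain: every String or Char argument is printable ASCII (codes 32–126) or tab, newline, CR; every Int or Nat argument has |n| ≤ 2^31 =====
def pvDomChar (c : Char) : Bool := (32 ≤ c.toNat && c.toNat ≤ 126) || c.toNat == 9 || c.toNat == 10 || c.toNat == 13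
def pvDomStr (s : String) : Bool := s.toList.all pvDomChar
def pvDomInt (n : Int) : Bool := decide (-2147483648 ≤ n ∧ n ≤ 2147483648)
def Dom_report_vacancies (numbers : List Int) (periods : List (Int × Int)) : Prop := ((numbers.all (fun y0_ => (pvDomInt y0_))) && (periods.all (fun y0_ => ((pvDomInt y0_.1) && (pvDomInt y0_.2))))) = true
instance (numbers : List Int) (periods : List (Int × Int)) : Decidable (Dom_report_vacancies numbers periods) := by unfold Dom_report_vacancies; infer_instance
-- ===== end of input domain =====

-- B replaces A's single sweep (which resets the counters whenever a new maximum level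
-- appears) by two sweeps: the first computes the peak level M, the second accumulates
-- intervals and time only at level M.  Objective: alternative decomposition; not faster.

-- ===== PORT A =====
-- state: (max_intervals, max_time, count, max_vac, start)
def rvStepA : (Int × Int × Int × Int × Int) → (Int × Int) → (Int × Int × Int × Int × Int)
  | (mi, mt, c, mv, st), p =>
    if p.2 < 0 then
      if c + 1 > mv then (1, 0, c + 1, c + 1, p.1)
      else if c + 1 = mv then (mi + 1, mt, c + 1, mv, p.1)
      else (mi, mt, c + 1, mv, st)
    else
      if c = mv then (mi, mt + p.1 - st + 1, c - 1, mv, st)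
      else (mi, mt, c - 1, mv, st)

def report_vacancies (numbers : List Int) (periods : List (Int × Int)) : Int × Int :=
  let s := periods.foldl rvStepA (0, 0, 0, 0, 0)
  (s.1, s.2.1)

-- ===== PORT B =====
-- pass 1 state: (count, m)
def rvStep1 : (Int × Int) → (Int × Int) → (Int × Int)
  | (c, m), p =>
    if p.2 < 0 then (c + 1, if c + 1 > m then c + 1 else m)
    else (c - 1, m)

-- pass 2 state: (count, start, max_intervals, max_time)
def rvStep2 (m : Int) : (Int × Int × Int × Int) → (Int × Int) → (Int × Int × Int × Int)
  | (c, st, mi, mt), p =>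
    if p.2 < 0 then
      if c + 1 = m then (c + 1, p.1, mi + 1, mt)
      else (c + 1, st, mi, mt)
    else
      if c = m then (c - 1, st, mi, mt + p.1 - st + 1)
      else (c - 1, st, mi, mt)

def report_vacancies_alt (numbers : List Int) (periods : List (Int × Int)) : Int × Int :=
  let m := (periods.foldl rvStep1 (0, 0)).2
  let s := periods.foldl (rvStep2 m) (0, 0, 0, 0)
  (s.2.2.1, s.2.2.2)

-- ===== PRECONDITION & SPEC =====
def Spec_report_vacancies (numbers : List Int) (periods : List (Int × Int)) (out : Int × Int) : Prop := out = report_vacancies_alt numbers periods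
instance (numbers : List Int) (periods : List (Int × Int)) (out : Int × Int) : Decidable (Spec_report_vacancies numbers periods out) := by unfold Spec_report_vacancies; infer_instance

-- ===== CLAIM (what is proved, stated in full; the proofs are below) =====
def Claim_equal_report_vacancies : Prop := ∀ (numbers : List Int) (periods : List (Int × Int)), Dom_report_vacancies numbers periods → Spec_report_vacancies numbers periods (report_vacancies numbers periods)

-- ===== LEMMAS AND PROOFS =====

-- m is monotone along pass 1
theorem rvStep1_mono : ∀ (ps : List (Int × Int)) (c m : Int),
    m ≤ (ps.foldl rvStep1 (c, m)).2 := by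
  intro ps
  induction ps with
  | nil => intro c m; simp
  | cons p ps ih =>
    intro c m
    simp only [List.foldl_cons, rvStep1]
    split
    · split
      · exact le_trans (by omega) (ih (c + 1) (c + 1))
      · exact ih (c + 1) m
    · exact ih (c - 1) m

-- Case I: max_vac already equals the final peak; A's sweep and B's second pass agree step for step.
theorem rv_caseI : ∀ (ps : List (Int × Int)) (c mv mi mt st : Int),
    (ps.foldl rvStep1 (c, mv)).2 = mv →
    (let a := ps.foldl rvStepA (mi, mt, c, mv, st)
     ((a.1, a.2.1) : Int × Int)) =
    (let b := ps.foldl (rvStep2 mv) (c, st, mi, mt)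
     (b.2.2.1, b.2.2.2)) := by
  intro ps
  induction ps with
  | nil => intro c mv mi mt st _; simp
  | cons p ps ih =>
    intro c mv mi mt st h
    simp only [List.foldl_cons, rvStepA, rvStep1, rvStep2] at *
    by_cases hp : p.2 < 0
    · simp only [hp, if_pos] at h ⊢
      have hle : ¬ c + 1 > mv := by
        by_contra hgt
        simp only [if_pos hgt] at h
        have := rvStep1_mono ps (c + 1) (c + 1)
        omega
      simp only [if_neg hle] at h ⊢
      by_cases heq : c + 1 = mv
      · simp only [if_pos heq]
        exact ih (c + 1) mv (mi + 1) mt p.1 h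
      · simp only [if_neg heq]
        exact ih (c + 1) mv mi mt st h
    · simp only [if_neg hp] at h ⊢
      by_cases heq : c = mv
      · simp only [if_pos heq]
        exact ih (c - 1) mv mi (mt + p.1 - st + 1) st h
      · simp only [if_neg heq]
        exact ih (c - 1) mv mi mt st h

-- Case II: the peak M is still ahead; A will reset its counters at the event reaching M,
-- so its result is independent of mi/mt/st, and B has accumulated nothing yet.
theorem rv_caseII : ∀ (ps : List (Int × Int)) (c mv M mi mt st st2 : Int),
    c ≤ mv →
    (ps.foldl rvStep1 (c, mv)).2 = M →
    mv < M →
    (let a := ps.foldl rvStepA (mi, mt, c, mv, st)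
     ((a.1, a.2.1) : Int × Int)) =
    (let b := ps.foldl (rvStep2 M) (c, st2, 0, 0)
     (b.2.2.1, b.2.2.2)) := by
  intro ps
  induction ps with
  | nil =>
    intro c mv M mi mt st st2 _ h hlt
    simp at h; omega
  | cons p ps ih =>
    intro c mv M mi mt st st2 hcm h hlt
    simp only [List.foldl_cons, rvStepA, rvStep1, rvStep2] at *
    by_cases hp : p.2 < 0
    · simp only [hp, if_pos] at h ⊢
      by_cases hgt : c + 1 > mv
      · simp only [if_pos hgt] at h ⊢
        by_cases hM : c + 1 = M
        · simp only [if_pos hM]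
          subst hM
          exact rv_caseI ps (c + 1) (c + 1) 1 0 p.1 h
        · simp only [if_neg hM]
          have hle : c + 1 ≤ M := by
            have := rvStep1_mono ps (c + 1) (c + 1); omega
          exact ih (c + 1) (c + 1) M 1 0 p.1 st2 le_rfl h (by omega)
      · simp only [if_neg hgt] at h ⊢
        have hM : ¬ c + 1 = M := by omega
        simp only [if_neg hM]
        by_cases heq : c + 1 = mv
        · simp only [if_pos heq]
          exact ih (c + 1) mv M (mi + 1) mt p.1 st2 (by omega) h hlt
        · simp only [if_neg heq]
          exact ih (c + 1) mv M mi mt st st2 (by omega) h hlt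
    · simp only [if_neg hp] at h ⊢
      have hM : ¬ c = M := by omega
      simp only [if_neg hM]
      by_cases heq : c = mv
      · simp only [if_pos heq]
        exact ih (c - 1) mv M mi (mt + p.1 - st + 1) st st2 (by omega) h hlt
      · simp only [if_neg heq]
        exact ih (c - 1) mv M mi mt st st2 (by omega) h hlt

-- ===== VERDICT (by name: the statement is the Claim_ definition above) =====
theorem report_vacancies_spec : Claim_equal_report_vacancies := by
  unfold Claim_equal_report_vacancies
  intro numbers periods _
  unfold Spec_report_vacancies report_vacancies report_vacancies_alt
  by_cases h0 : (periods.foldl rvStep1 (0, 0)).2 = 0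
  · simpa [h0] using rv_caseI periods 0 0 0 0 0 h0
  · have hpos : 0 < (periods.foldl rvStep1 (0, 0)).2 := by
      have := rvStep1_mono periods 0 0; omega
    simpa using rv_caseII periods 0 0 ((periods.foldl rvStep1 (0, 0)).2) 0 0 0 0 le_rfl rfl hpos
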